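-- pv_equiv track=rewrite | github.com/buriXzura/coding_for_senpai | documentation/src/django-server/plag_check.py | max_match
-- ===== SOURCE A (Python) =====
-- def max_match (pattern_hash, index, s, Hashes, string_index, pattern_marks, string_marks) :
--
--     """! This function gives the length of maximum string match at the given starting from the given indices.
--
--     @param pattern_hash list of hash values of string 1
--     @param Hashes list of hash values of string 2
--     @param index the index for string 1 from where the match is to be found
--     @param string_index the index for string 2 from where the match is to be found
--     @param s the value of K for the K-gram hashing
--     @param pattern_marks the closest index in the right neighbourhood for which a match's already found in string1
--     @param pattern_marks the closest index in the right neighbourhood for which a match's already found in string2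
--     @return returns the size of the match
--
--     """
--
--     if index+s>len(pattern_hash) or index+2*s>=pattern_marks or string_index+s>len(Hashes) or string_index+2*s>=string_marks:
--         k = min(len(pattern_hash)-index, pattern_marks-index-s+1,len(Hashes)-string_index, string_marks-string_index-s+1)
--
--         for i in range(1,k):
--             if pattern_hash[index+i] != Hashes[string_index+i]:
--                 return s+i-1
--
--         return s+k-1
--     elif pattern_hash[index+s] == Hashes[string_index+s]:
--         return s + max_match(pattern_hash, index+s, s, Hashes, string_index+s, pattern_marks, string_marks)
--     else:
--         for i in range(1,s+1):
--             if pattern_hash[index+i] != Hashes[string_index+i]: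
--                 return s+i-1
-- ===== SOURCE B (Python) =====
-- def max_match(pattern_hash, index, s, Hashes, string_index, pattern_marks, string_marks):
--     # Two-phase form: first count t = number of whole s-blocks whose stride-s hash
--     # matches (closed-form offset t*s instead of threading indices), then one unified
--     # linear scan with a computed limit; answer = t*s + s + r - 1.
--     L1, L2 = len(pattern_hash), len(Hashes)
--
--     def blocked(i, j):
--         return i + s > L1 or i + 2 * s >= pattern_marks or j + s > L2 or j + 2 * s >= string_marks
--
--     t = 0
--     while not blocked(index + t * s, string_index + t * s) \
--             and pattern_hash[index + t * s + s] == Hashes[string_index + t * s + s]: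
--         t += 1
--
--     i0, j0 = index + t * s, string_index + t * s
--     if blocked(i0, j0):
--         limit = min(L1 - i0, pattern_marks - i0 - s + 1, L2 - j0, string_marks - j0 - s + 1)
--     else:
--         # stride hash at offset s mismatched: a mismatch inside 1..s is guaranteed
--         limit = s + 1
--     r = next((i for i in range(1, limit)
--               if pattern_hash[i0 + i] != Hashes[j0 + i]), limit)
--     return t * s + s + r - 1
-- ===== Notes on version B (the rewrite author's own statement) =====
-- stated objective: alternative
-- what changed: B splits A's non-tail recursion into two phases: a counting loop that only finds t, the number of whole s-blocks whose stride-s hashes match (positions computed in closed form as index + t*s), and then ONE unified linear scan whose limit (k or s+1) depends on why the counting stopped, returning t*s + s + r - 1; A instead recurses, adds s after each call, and has two separate scan loops.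
-- outside the precondition, e.g. on max_match([0, 3, 10], 2, 0, [4387, 2, 22], 2, 7, 8): A returns None, B returns 0; on max_match([1, 2], 0, 1, [1, 2], 0, 10, 0): A returns 0, B returns 0; on max_match([1, 2], 0, 0, [1, 2], 0, 0, 0): A returns 0, B returns 0
import Mathlib
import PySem

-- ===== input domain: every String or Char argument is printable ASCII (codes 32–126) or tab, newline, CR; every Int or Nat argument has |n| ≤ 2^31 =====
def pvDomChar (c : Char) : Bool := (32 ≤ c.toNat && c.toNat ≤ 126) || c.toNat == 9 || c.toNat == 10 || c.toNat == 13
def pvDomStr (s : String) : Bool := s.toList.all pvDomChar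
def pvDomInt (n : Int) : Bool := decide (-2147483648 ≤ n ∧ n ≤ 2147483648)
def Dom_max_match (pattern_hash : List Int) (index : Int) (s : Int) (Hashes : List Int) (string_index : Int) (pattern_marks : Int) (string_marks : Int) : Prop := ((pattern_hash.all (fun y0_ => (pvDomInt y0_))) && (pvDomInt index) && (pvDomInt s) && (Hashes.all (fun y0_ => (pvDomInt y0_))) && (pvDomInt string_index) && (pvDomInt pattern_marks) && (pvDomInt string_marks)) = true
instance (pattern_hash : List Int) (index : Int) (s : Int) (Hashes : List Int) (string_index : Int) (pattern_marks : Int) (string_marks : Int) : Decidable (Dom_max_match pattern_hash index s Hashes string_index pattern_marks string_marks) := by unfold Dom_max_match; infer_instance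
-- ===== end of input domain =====

-- B replaces A's non-tail recursion by a block-counting phase (closed-form offsets t*s) plus one unified find-first-mismatch scan; same values.


-- ===== PORT A =====
-- Indexing is ported with PySem.List.pyGet? (Python's xs[i], incl. negative indices from the
-- end; none = IndexError); under Pre_ every access an executed branch makes is in range, so
-- the Option comparison is exactly Python's value comparison.
-- 'for i in range(1,k): if ph[index+i] != H[si+i]: return s+i-1' then 'return s+k-1';
-- cnt = remaining iterations, i = current loop variable.
def mmScanK (ph H : List Int) (index si s k : Int) : Nat → Int → Int
  | 0, _ => s + k - 1
  | cnt + 1, i =>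
    if PySem.List.pyGet? ph (index + i) ≠ PySem.List.pyGet? H (si + i) then s + i - 1
    else mmScanK ph H index si s k cnt (i + 1)

-- else-branch scan 'for i in range(1,s+1)': Python falls off returning None if no mismatch,
-- but that is unreachable (this branch is entered only when offset s itself mismatches,
-- and i = s re-checks that pair); the fall-off value 0 is never produced.
def mmScanS (ph H : List Int) (index si s : Int) : Nat → Int → Int
  | 0, _ => 0
  | cnt + 1, i =>
    if PySem.List.pyGet? ph (index + i) ≠ PySem.List.pyGet? H (si + i) then s + i - 1
    else mmScanS ph H index si s cnt (i + 1)

-- A's recursion, with fuel as a totality guard only: under Pre_ index starts ≥ -length and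
-- strictly grows by s ≥ 1 while index + s ≤ length, so the depth is at most 2*length + 1
-- and fuel 2*length + 2 is never exhausted on admitted inputs.
def mmA (ph H : List Int) (s pm sm : Int) : Nat → Int → Int → Int
  | 0, _, _ => 0
  | fuel + 1, index, si =>
    if index + s > (ph.length : Int) ∨ index + 2 * s ≥ pm ∨
       si + s > (H.length : Int) ∨ si + 2 * s ≥ sm then
      let k := min (min (min ((ph.length : Int) - index) (pm - index - s + 1))
                        ((H.length : Int) - si)) (sm - si - s + 1)
      mmScanK ph H index si s k (k - 1).toNat 1
    else if PySem.List.pyGet? ph (index + s) = PySem.List.pyGet? H (si + s) then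
      s + mmA ph H s pm sm fuel (index + s) (si + s)
    else
      mmScanS ph H index si s s.toNat 1

def max_match (pattern_hash : List Int) (index : Int) (s : Int) (Hashes : List Int) (string_index : Int) (pattern_marks : Int) (string_marks : Int) : Int :=
  mmA pattern_hash Hashes s pattern_marks string_marks (2 * pattern_hash.length + 2) index string_index

-- ===== PORT B =====
-- Source B's 'blocked(i, j)' helper (a Bool, as a Python condition).
def mmBlocked (ph H : List Int) (s pm sm i j : Int) : Bool :=
  decide (i + s > (ph.length : Int)) || decide (i + 2 * s ≥ pm) ||
  decide (j + s > (H.length : Int)) || decide (j + 2 * s ≥ sm)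

-- Source B's counting while-loop: t += 1 while the block at offset t*s matches; fuel is the
-- same totality guard as in port A (never exhausted under Pre_).
def mmCount (ph H : List Int) (s pm sm index si : Int) : Nat → Nat → Nat
  | 0, t => t
  | fuel + 1, t =>
    if ¬ mmBlocked ph H s pm sm (index + (t : Int) * s) (si + (t : Int) * s) ∧
       PySem.List.pyGet? ph (index + (t : Int) * s + s) = PySem.List.pyGet? H (si + (t : Int) * s + s)
    then mmCount ph H s pm sm index si fuel (t + 1) else t

-- Source B's 'next((i for i in range(1, limit) if ph[i0+i] != H[j0+i]), limit)'.
def mmFirst (ph H : List Int) (i0 j0 limit : Int) : Int :=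
  match (PySem.List.pyRange 1 limit 1).find?
      (fun r => PySem.List.pyGet? ph (i0 + r) != PySem.List.pyGet? H (j0 + r)) with
  | some r => r
  | none => limit

def max_match_alt (pattern_hash : List Int) (index : Int) (s : Int) (Hashes : List Int) (string_index : Int) (pattern_marks : Int) (string_marks : Int) : Int :=
  let t : Nat := mmCount pattern_hash Hashes s pattern_marks string_marks index string_index
      (2 * pattern_hash.length + 2) 0
  let i0 := index + (t : Int) * s
  let j0 := string_index + (t : Int) * s
  let limit :=
    if mmBlocked pattern_hash Hashes s pattern_marks string_marks i0 j0 then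
      min (min (min ((pattern_hash.length : Int) - i0) (pattern_marks - i0 - s + 1))
               ((Hashes.length : Int) - j0)) (string_marks - j0 - s + 1)
    else s + 1
  (t : Int) * s + s + mmFirst pattern_hash Hashes i0 j0 limit - 1

-- ===== PRECONDITION & SPEC =====
-- Pre_ excludes exactly the regions where Python A can fail to return an int: s ≤ 0 (the
-- else-scan is empty so A can return None, or recurse forever), a start index below -len
-- (IndexError reachable in the scans), and the stride patterns s ∣ (len - start) with the
-- mark beyond len + s, under which the fast path can step exactly onto offset len and raise
-- IndexError (whether it does depends on the hash values, so this closed form slightly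
-- over-excludes: on excluded inputs where A does return, B returns the same value — see cites).
def Pre_max_match (pattern_hash : List Int) (index : Int) (s : Int) (Hashes : List Int) (string_index : Int) (pattern_marks : Int) (string_marks : Int) : Prop :=
  1 ≤ s ∧ -(pattern_hash.length : Int) ≤ index ∧ -(Hashes.length : Int) ≤ string_index ∧
  ¬(s ∣ ((pattern_hash.length : Int) - index) ∧ s ≤ (pattern_hash.length : Int) - index ∧
      (pattern_hash.length : Int) + s < pattern_marks) ∧
  ¬(s ∣ ((Hashes.length : Int) - string_index) ∧ s ≤ (Hashes.length : Int) - string_index ∧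
      (Hashes.length : Int) + s < string_marks)
instance (pattern_hash : List Int) (index : Int) (s : Int) (Hashes : List Int) (string_index : Int) (pattern_marks : Int) (string_marks : Int) : Decidable (Pre_max_match pattern_hash index s Hashes string_index pattern_marks string_marks) := by unfold Pre_max_match; infer_instance

def pvWitness_max_match : List Int × Int × Int × List Int × Int × Int × Int :=
  ([1, 2, 3], 0, 1, [1, 2, 3], 0, 2, 2)

def Spec_max_match (pattern_hash : List Int) (index : Int) (s : Int) (Hashes : List Int) (string_index : Int) (pattern_marks : Int) (string_marks : Int) (out : Int) : Prop := out = max_match_alt pattern_hash index s Hashes string_index pattern_marks string_marks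
instance (pattern_hash : List Int) (index : Int) (s : Int) (Hashes : List Int) (string_index : Int) (pattern_marks : Int) (string_marks : Int) (out : Int) : Decidable (Spec_max_match pattern_hash index s Hashes string_index pattern_marks string_marks out) := by unfold Spec_max_match; infer_instance

-- ===== CLAIM =====
def Claim_equal_max_match : Prop := ∀ (pattern_hash : List Int) (index : Int) (s : Int) (Hashes : List Int) (string_index : Int) (pattern_marks : Int) (string_marks : Int), Dom_max_match pattern_hash index s Hashes string_index pattern_marks string_marks → Pre_max_match pattern_hash index s Hashes string_index pattern_marks string_marks → Spec_max_match pattern_hash index s Hashes string_index pattern_marks string_marks (max_match pattern_hash index s Hashes string_index pattern_marks string_marks)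

-- ===== LEMMAS AND PROOFS =====

-- the value B's final formula produces from a given fuel and state
def mmAltVal (ph H : List Int) (s pm sm : Int) (fuel : Nat) (index si : Int) : Int :=
  let t : Nat := mmCount ph H s pm sm index si fuel 0
  let i0 := index + (t : Int) * s
  let j0 := si + (t : Int) * s
  let limit :=
    if mmBlocked ph H s pm sm i0 j0 then
      min (min (min ((ph.length : Int) - i0) (pm - i0 - s + 1))
               ((H.length : Int) - j0)) (sm - j0 - s + 1)
    else s + 1
  (t : Int) * s + s + mmFirst ph H i0 j0 limit - 1

theorem mmAltVal_spec (ph H : List Int) (s pm sm index si : Int) :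
    max_match_alt ph index s H si pm sm
      = mmAltVal ph H s pm sm (2 * ph.length + 2) index si := rfl

-- shift lemma for the counter: counting from t+1 with base (index,si) is counting
-- from t with base (index+s, si+s), plus one.
theorem mmCount_shift (ph H : List Int) (s pm sm : Int) :
    ∀ (fuel : Nat) (index si : Int) (t : Nat),
      mmCount ph H s pm sm index si fuel (t + 1)
        = mmCount ph H s pm sm (index + s) (si + s) fuel t + 1 := by
  intro fuel
  induction fuel with
  | zero => intro index si t; simp [mmCount]
  | succ n ih =>
    intro index si t
    have harg1 : index + ((t : Int) + 1) * s = index + s + (t : Int) * s := by ring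
    have harg2 : si + ((t : Int) + 1) * s = si + s + (t : Int) * s := by ring
    simp only [mmCount, Nat.cast_add, Nat.cast_one, harg1, harg2]
    split_ifs with h
    · exact ih (index) (si) (t + 1) ▸ ih index si (t + 1)
    · rfl

-- A's guard-scan equals find?-over-range
theorem mmScanK_eq_find (ph H : List Int) (index si s k : Int) :
    ∀ (cnt : Nat) (i : Int),
      mmScanK ph H index si s k cnt i
        = match (PySem.List.pyRange i (i + cnt) 1).find?
              (fun r => PySem.List.pyGet? ph (index + r) != PySem.List.pyGet? H (si + r)) with
          | some r => s + r - 1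
          | none => s + k - 1 := by
  intro cnt
  induction cnt with
  | zero =>
    intro i
    rw [show i + ((0 : Nat) : Int) = i by simp, PySem.List.pyRange_one_eq_nil le_rfl]
    simp [mmScanK]
  | succ n ih =>
    intro i
    have hlt : i < i + ((n + 1 : Nat) : Int) := by push_cast; omega
    rw [PySem.List.pyRange_one_cons hlt, List.find?_cons]
    by_cases h : PySem.List.pyGet? ph (index + i) ≠ PySem.List.pyGet? H (si + i)
    · have hb : (PySem.List.pyGet? ph (index + i) != PySem.List.pyGet? H (si + i)) = true :=
        bne_iff_ne.mpr h
      rw [hb]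
      simp only [mmScanK, if_pos h]
    · have hb : (PySem.List.pyGet? ph (index + i) != PySem.List.pyGet? H (si + i)) = false := by
        simpa [bne_iff_ne] using not_not.mp h
      rw [hb]
      simp only [mmScanK, if_neg h]
      rw [ih (i + 1)]
      have : i + 1 + (n : Int) = i + ((n + 1 : Nat) : Int) := by push_cast; ring
      rw [this]

-- same for the else-branch scan (fall-off value 0)
theorem mmScanS_eq_find (ph H : List Int) (index si s : Int) :
    ∀ (cnt : Nat) (i : Int),
      mmScanS ph H index si s cnt i
        = match (PySem.List.pyRange i (i + cnt) 1).find?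
              (fun r => PySem.List.pyGet? ph (index + r) != PySem.List.pyGet? H (si + r)) with
          | some r => s + r - 1
          | none => 0 := by
  intro cnt
  induction cnt with
  | zero =>
    intro i
    rw [show i + ((0 : Nat) : Int) = i by simp, PySem.List.pyRange_one_eq_nil le_rfl]
    simp [mmScanS]
  | succ n ih =>
    intro i
    have hlt : i < i + ((n + 1 : Nat) : Int) := by push_cast; omega
    rw [PySem.List.pyRange_one_cons hlt, List.find?_cons]
    by_cases h : PySem.List.pyGet? ph (index + i) ≠ PySem.List.pyGet? H (si + i)
    · have hb : (PySem.List.pyGet? ph (index + i) != PySem.List.pyGet? H (si + i)) = true :=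
        bne_iff_ne.mpr h
      rw [hb]
      simp only [mmScanS, if_pos h]
    · have hb : (PySem.List.pyGet? ph (index + i) != PySem.List.pyGet? H (si + i)) = false := by
        simpa [bne_iff_ne] using not_not.mp h
      rw [hb]
      simp only [mmScanS, if_neg h]
      rw [ih (i + 1)]
      have : i + 1 + (n : Int) = i + ((n + 1 : Nat) : Int) := by push_cast; ring
      rw [this]

-- guard scan, packaged as B's mmFirst with limit k
theorem mmScanK_eq_first (ph H : List Int) (index si s k : Int) :
    mmScanK ph H index si s k (k - 1).toNat 1 = s + mmFirst ph H index si k - 1 := by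
  rw [mmScanK_eq_find]
  unfold mmFirst
  have hr : PySem.List.pyRange 1 (1 + ((k - 1).toNat : Int)) 1 = PySem.List.pyRange 1 k 1 := by
    by_cases hk : 1 ≤ k
    · congr 1; omega
    · rw [PySem.List.pyRange_one_eq_nil (by omega), PySem.List.pyRange_one_eq_nil (by omega)]
  rw [hr]
  cases (PySem.List.pyRange 1 k 1).find?
      (fun r => PySem.List.pyGet? ph (index + r) != PySem.List.pyGet? H (si + r)) with
  | none => ring
  | some r => ring

-- else-branch scan, packaged as mmFirst with limit s+1 (a mismatch at offset s is given)
theorem mmScanS_eq_first (ph H : List Int) (index si s : Int) (hs : 1 ≤ s)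
    (hmis : PySem.List.pyGet? ph (index + s) ≠ PySem.List.pyGet? H (si + s)) :
    mmScanS ph H index si s s.toNat 1 = s + mmFirst ph H index si (s + 1) - 1 := by
  rw [mmScanS_eq_find]
  unfold mmFirst
  have hr : PySem.List.pyRange 1 (1 + (s.toNat : Int)) 1 = PySem.List.pyRange 1 (s + 1) 1 := by
    congr 1; omega
  rw [hr]
  have hmem : s ∈ PySem.List.pyRange 1 (s + 1) 1 := by
    rw [PySem.List.mem_pyRange_one]; omega
  have hsome : ((PySem.List.pyRange 1 (s + 1) 1).find?
      (fun r => PySem.List.pyGet? ph (index + r) != PySem.List.pyGet? H (si + r))).isSome := by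
    rw [List.find?_isSome]
    exact ⟨s, hmem, by simpa [bne_iff_ne] using hmis⟩
  obtain ⟨r, hr'⟩ := Option.isSome_iff_exists.mp hsome
  rw [hr']

-- main correspondence: A's recursion equals B's two-phase value, for every fuel that is
-- large enough (either we are already blocked and one unit of fuel remains, or index ≤ len
-- and fuel exceeds len - index)
theorem mmA_eq_altVal (ph H : List Int) (s pm sm : Int) (hs : 1 ≤ s) :
    ∀ (fuel : Nat) (index si : Int),
      ((index + s > (ph.length : Int) ∨ index + 2 * s ≥ pm ∨
        si + s > (H.length : Int) ∨ si + 2 * s ≥ sm) ∧ 1 ≤ fuel) ∨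
      (index ≤ (ph.length : Int) ∧ (ph.length : Int) - index < fuel) →
      mmA ph H s pm sm fuel index si = mmAltVal ph H s pm sm fuel index si := by
  intro fuel
  induction fuel with
  | zero =>
    intro index si h
    rcases h with ⟨_, h1⟩ | ⟨h1, h2⟩
    · omega
    · omega
  | succ n ih =>
    intro index si h
    by_cases hb : index + s > (ph.length : Int) ∨ index + 2 * s ≥ pm ∨
        si + s > (H.length : Int) ∨ si + 2 * s ≥ sm
    · -- blocked: count is 0, limit is k
      have hbB : mmBlocked ph H s pm sm index si = true := by
        unfold mmBlocked
        rcases hb with h1 | h1 | h1 | h1 <;> simp [h1]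
      have hcount : mmCount ph H s pm sm index si (n + 1) 0 = 0 := by
        simp only [mmCount, Nat.cast_zero, zero_mul, add_zero]
        rw [if_neg]
        intro ⟨hnb, _⟩
        exact hnb hbB
      simp only [mmA, if_pos hb]
      unfold mmAltVal
      rw [hcount]
      simp only [Nat.cast_zero, zero_mul, add_zero, zero_add]
      rw [if_pos hbB, mmScanK_eq_first]
    · have hnbB : mmBlocked ph H s pm sm index si = false := by
        unfold mmBlocked
        push_neg at hb
        simp [hb.1, hb.2.1, hb.2.2.1, hb.2.2.2]
      simp only [mmA, if_neg hb]
      by_cases he : PySem.List.pyGet? ph (index + s) = PySem.List.pyGet? H (si + s)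
      · -- matching block: count is 1 + shifted count
        rw [if_pos he]
        have hcount : mmCount ph H s pm sm index si (n + 1) 0
            = mmCount ph H s pm sm (index + s) (si + s) n 0 + 1 := by
          simp only [mmCount, Nat.cast_zero, zero_mul, add_zero]
          rw [if_pos ⟨by simp [hnbB], he⟩]
          exact mmCount_shift ph H s pm sm n index si 0
        have hih : mmA ph H s pm sm n (index + s) (si + s)
            = mmAltVal ph H s pm sm n (index + s) (si + s) := by
          apply ih
          by_cases hb' : (index + s) + s > (ph.length : Int) ∨ (index + s) + 2 * s ≥ pm ∨
              (si + s) + s > (H.length : Int) ∨ (si + s) + 2 * s ≥ sm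
          · left
            refine ⟨hb', ?_⟩
            -- n ≥ 1: from h, since ¬blocked gives index + s ≤ len, so len - index ≥ s ≥ 1
            rcases h with ⟨hbb, _⟩ | ⟨_, h2⟩
            · exact absurd hbb hb
            · push_neg at hb; omega
          · right
            rcases h with ⟨hbb, _⟩ | ⟨_, h2⟩
            · exact absurd hbb hb
            · push_neg at hb hb'
              constructor <;> omega
        rw [hih]
        unfold mmAltVal
        rw [hcount]
        set t' : Nat := mmCount ph H s pm sm (index + s) (si + s) n 0 with ht'
        have e1 : index + ((t' + 1 : Nat) : Int) * s = index + s + (t' : Int) * s := by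
          push_cast; ring
        have e2 : si + ((t' + 1 : Nat) : Int) * s = si + s + (t' : Int) * s := by
          push_cast; ring
        simp only [e1, e2]
        push_cast
        ring
      · -- mismatching block: count is 0, limit is s+1
        rw [if_neg he]
        have hcount : mmCount ph H s pm sm index si (n + 1) 0 = 0 := by
          simp only [mmCount, Nat.cast_zero, zero_mul, add_zero]
          rw [if_neg]
          intro ⟨_, heq⟩
          exact he heq
        unfold mmAltVal
        rw [hcount]
        simp only [Nat.cast_zero, zero_mul, add_zero, zero_add]
        rw [if_neg (by simp [hnbB]), mmScanS_eq_first ph H index si s hs he]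

theorem max_match_spec : Claim_equal_max_match := by
  intro ph index s H si pm sm _ hpre
  obtain ⟨hs, hidx, hsi, _, _⟩ := hpre
  unfold Spec_max_match max_match
  rw [mmAltVal_spec]
  apply mmA_eq_altVal ph H s pm sm hs
  by_cases hle : index ≤ (ph.length : Int)
  · right; constructor
    · exact hle
    · push_cast; omega
  · left
    constructor
    · left; omega
    · omega
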